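-- pv_equiv track=rewrite | github.com/zenicc/projecteuler | euler113a.py | make_tuples
-- ===== SOURCE A (Python) =====
-- def make_tuples(depth, start, finish):
--     if depth == 0:
--         yield ()
--     else:
--         if finish > start:
--             up = 1
--         else:
--             up = -1
--         # for x in range(start, finish, up):
--         # for t in make_tuples(depth - 1, x + up, finish):
--         for x in range(start, finish, up):
--             for t in make_tuples(depth - 1, x, finish):
--                 yield (x,) + t
-- ===== SOURCE B (Python) =====
-- def make_tuples(depth, start, finish):
--     # Iterative layer-by-layer construction: each pass extends every partial
--     # tuple (paired with the index it may continue from) by each later element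
--     # of the range, instead of recursing depth-first.
--     if depth < 0:
--         return
--     up = 1 if finish > start else -1
--     rng = range(start, finish, up)
--     layer = [((), 0)]
--     for _ in range(depth):
--         if not layer:
--             break
--         layer = [(t + (rng[i],), i) for t, j in layer for i in range(j, len(rng))]
--     for t, _ in layer:
--         yield t
-- ===== Notes on version B (the rewrite author's own statement) =====
-- stated objective: alternative
-- what changed: Replaces the depth-first recursive generator (which re-creates a range at every node) with an iterative layer-by-layer breadth construction over one materialized range, carrying (partial tuple, remaining suffix) pairs.
import Mathlib
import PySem

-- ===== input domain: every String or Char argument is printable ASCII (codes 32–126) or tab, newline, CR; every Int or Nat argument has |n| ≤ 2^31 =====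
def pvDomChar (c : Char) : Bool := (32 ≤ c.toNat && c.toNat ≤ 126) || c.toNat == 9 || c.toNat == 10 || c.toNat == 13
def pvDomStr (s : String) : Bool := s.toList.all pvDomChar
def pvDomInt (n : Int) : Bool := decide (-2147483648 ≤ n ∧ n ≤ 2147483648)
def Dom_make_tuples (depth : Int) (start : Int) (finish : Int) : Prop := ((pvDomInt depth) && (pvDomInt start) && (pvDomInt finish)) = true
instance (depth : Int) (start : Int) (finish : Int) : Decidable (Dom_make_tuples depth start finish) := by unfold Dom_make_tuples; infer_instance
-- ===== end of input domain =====

-- B replaces A's depth-first recursive generator by an iterative layer-by-layer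
-- construction over one materialized range; return-value equivalence is proved on Pre_.

-- ===== PORT A =====
-- Literal port of A's recursive generator; fuel = depth.toNat bounds the recursion
-- (the recursion consumes exactly depth levels whenever depth ≥ 0, so fuel never
-- runs out on inputs where Python A terminates).
def mtA (fuel : Nat) (depth : Int) (start : Int) (finish : Int) : List (List Int) :=
  if depth = 0 then [[]]
  else
    match fuel with
    | 0 => []
    | f + 1 =>
      let up : Int := if finish > start then 1 else -1
      (PySem.List.pyRange start finish up).flatMap
        (fun x => (mtA f (depth - 1) x finish).map (fun t => x :: t))

def make_tuples (depth : Int) (start : Int) (finish : Int) : List (List Int) :=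
  mtA depth.toNat depth start finish

-- ===== PORT B =====
-- '[(t + (rng[i],), i) for t, j in layer for i in range(j, len(rng))]' of Source B;
-- rng[i] is ported as pyGetD with default 0: every produced index i satisfies 0 ≤ i < len(rng).
def layerStep (rng : List Int) (layer : List (List Int × Int)) : List (List Int × Int) :=
  layer.flatMap (fun p =>
    (PySem.List.pyRange p.2 (rng.length : Int) 1).map
      (fun i => (p.1 ++ [PySem.List.pyGetD rng i 0], i)))

def make_tuples_alt (depth : Int) (start : Int) (finish : Int) : List (List Int) :=
  if depth < 0 then []
  else
    let up : Int := if finish > start then 1 else -1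
    let rng := PySem.List.pyRange start finish up
    (((List.range depth.toNat).foldl
        (fun layer _ => if layer = [] then layer else layerStep rng layer)
        [([], (0 : Int))]).map
      (fun p => p.1))

-- ===== PRECONDITION & SPEC =====
-- Pre_ excludes exactly the inputs where Python A raises: depth < 0 with a nonempty
-- range (the recursion never reaches depth == 0 and A dies with RecursionError).
def Pre_make_tuples (depth : Int) (start : Int) (finish : Int) : Prop :=
  0 ≤ depth ∨ start = finish
instance (depth : Int) (start : Int) (finish : Int) : Decidable (Pre_make_tuples depth start finish) := by unfold Pre_make_tuples; infer_instance
def pvWitness_make_tuples : Int × Int × Int := (2, 0, 3)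

def Spec_make_tuples (depth : Int) (start : Int) (finish : Int) (out : List (List Int)) : Prop := out = make_tuples_alt depth start finish
instance (depth : Int) (start : Int) (finish : Int) (out : List (List Int)) : Decidable (Spec_make_tuples depth start finish out) := by unfold Spec_make_tuples; infer_instance

-- ===== CLAIM (what is proved, stated in full; the proofs are below) =====
def Claim_equal_make_tuples : Prop := ∀ (depth : Int) (start : Int) (finish : Int), Dom_make_tuples depth start finish → Pre_make_tuples depth start finish → Spec_make_tuples depth start finish (make_tuples depth start finish)

-- ===== LEMMAS AND PROOFS =====

-- canonical combinations-with-replacement on a list (proof-only common form)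
def cwr : Nat → List Int → List (List Int)
  | 0, _ => [[]]
  | _ + 1, [] => []
  | k + 1, x :: xs => ((cwr k (x :: xs)).map (fun t => x :: t)) ++ cwr (k + 1) xs

theorem layerStep_append (rng : List Int) (l1 l2 : List (List Int × Int)) :
    layerStep rng (l1 ++ l2) = layerStep rng l1 ++ layerStep rng l2 := by
  simp [layerStep]

theorem iterate_layerStep_append (rng : List Int) (k : Nat) (l1 l2 : List (List Int × Int)) :
    (layerStep rng)^[k] (l1 ++ l2) = (layerStep rng)^[k] l1 ++ (layerStep rng)^[k] l2 := by
  induction k generalizing l1 l2 with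
  | zero => simp
  | succ k ih =>
    simp only [Function.iterate_succ_apply, layerStep_append, ih]

theorem iterate_layerStep_nil (rng : List Int) (k : Nat) :
    (layerStep rng)^[k] ([] : List (List Int × Int)) = [] := by
  induction k with
  | zero => rfl
  | succ k ih => simp only [Function.iterate_succ_apply, layerStep, List.flatMap_nil, ih]

theorem iterate_singleton (rng : List Int) (k : Nat) (t : List Int) (j : Int) (hj : 0 ≤ j) :
    (((layerStep rng)^[k] [(t, j)]).map (fun p => p.1)) =
      (cwr k (rng.drop j.toNat)).map (fun s => t ++ s) := by
  induction k generalizing t j with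
  | zero => simp [cwr]
  | succ k ih =>
    rw [Function.iterate_succ_apply]
    have hstep : layerStep rng [(t, j)] =
        (PySem.List.pyRange j (rng.length : Int) 1).map
          (fun i => (t ++ [PySem.List.pyGetD rng i 0], i)) := by
      simp [layerStep]
    rw [hstep]
    -- inner induction on the number of remaining indices
    have key : ∀ (m : Nat) (i : Int), 0 ≤ i → ((rng.length : Int) - i).toNat = m →
        ((((layerStep rng)^[k]) ((PySem.List.pyRange i (rng.length : Int) 1).map
            (fun i' => (t ++ [PySem.List.pyGetD rng i' 0], i')))).map (fun p => p.1)) =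
          (cwr (k + 1) (rng.drop i.toNat)).map (fun s => t ++ s) := by
      intro m
      induction m with
      | zero =>
        intro i hi hm
        have hge : (rng.length : Int) ≤ i := by omega
        have hdrop : rng.drop i.toNat = [] := by
          apply List.drop_eq_nil_of_le
          omega
        rw [PySem.List.pyRange_one_eq_nil hge, hdrop]
        simp [iterate_layerStep_nil, cwr]
      | succ m ihm =>
        intro i hi hm
        have hlt : i < (rng.length : Int) := by omega
        have hnat : i.toNat < rng.length := by omega
        rw [PySem.List.pyRange_one_cons hlt, List.map_cons]
        have hsplit : ((t ++ [PySem.List.pyGetD rng i 0], i) ::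
            (PySem.List.pyRange (i + 1) (rng.length : Int) 1).map
              (fun i' => (t ++ [PySem.List.pyGetD rng i' 0], i'))) =
            [(t ++ [PySem.List.pyGetD rng i 0], i)] ++
            (PySem.List.pyRange (i + 1) (rng.length : Int) 1).map
              (fun i' => (t ++ [PySem.List.pyGetD rng i' 0], i')) := rfl
        rw [hsplit, iterate_layerStep_append, List.map_append, ih _ _ hi,
          ihm (i + 1) (by omega) (by omega)]
        have hget : PySem.List.pyGetD rng i 0 = rng[i.toNat] :=
          PySem.List.pyGetD_eq_getElem rng 0 hi (by simpa using hlt)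
        have hdrop : rng.drop i.toNat = rng[i.toNat] :: rng.drop (i.toNat + 1) :=
          List.drop_eq_getElem_cons hnat
        have htn : (i + 1).toNat = i.toNat + 1 := by omega
        rw [← htn, ← hget] at hdrop
        rw [hdrop, cwr]
        simp [List.map_map, Function.comp_def, List.append_assoc]
    exact key ((rng.length : Int) - j).toNat j hj rfl

-- the 'if not layer: break' of Source B is a pure optimisation: layerStep [] = []
theorem guard_layerStep (rng : List Int) (layer : List (List Int × Int)) :
    (if layer = [] then layer else layerStep rng layer) = layerStep rng layer := by
  by_cases h : layer = []
  · subst h; simp [layerStep]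
  · simp [h]

theorem foldl_range_iterate (rng : List Int) (k : Nat) (l : List (List Int × Int)) :
    (List.range k).foldl
        (fun layer _ => if layer = [] then layer else layerStep rng layer) l =
      (layerStep rng)^[k] l := by
  induction k with
  | zero => rfl
  | succ k ih =>
    rw [List.range_succ, List.foldl_append, ih, Function.iterate_succ_apply']
    simp [guard_layerStep]

theorem mtA_eq_cwr (f : Nat) (start finish : Int) :
    mtA f (f : Int) start finish =
      cwr f (PySem.List.pyRange start finish (if finish > start then 1 else -1)) := by
  induction f generalizing start with
  | zero => simp [mtA, cwr]
  | succ f ih =>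
    have hne : ((f : Int) + 1) ≠ 0 := by positivity
    rw [show ((f + 1 : Nat) : Int) = (f : Int) + 1 by push_cast; ring]
    rw [mtA]
    simp only [hne, if_false]
    by_cases hfs : finish > start
    · simp only [hfs, if_true, show ((f:Int) + 1 - 1) = (f:Int) by ring]
      -- induction on the size of the increasing range
      have key : ∀ (m : Nat) (s : Int), s ≤ finish → (finish - s).toNat = m →
          (PySem.List.pyRange s finish 1).flatMap
              (fun x => (mtA f ((f : Int)) x finish).map (fun t => x :: t)) =
            cwr (f + 1) (PySem.List.pyRange s finish 1) := by
        intro m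
        induction m with
        | zero =>
          intro s hs hm
          have : finish ≤ s := by omega
          rw [PySem.List.pyRange_one_eq_nil this]
          simp [cwr]
        | succ m ihm =>
          intro s hs hm
          have hlt : s < finish := by omega
          rw [PySem.List.pyRange_one_cons hlt]
          rw [List.flatMap_cons, cwr]
          have htail := ihm (s + 1) (by omega) (by omega)
          rw [htail]
          congr 1
          rw [ih s]
          have : finish > s := hlt
          simp only [this, if_pos]
          rw [← PySem.List.pyRange_one_cons hlt]
      exact key (finish - start).toNat start (le_of_lt hfs) rfl
    · simp only [hfs, if_false, show ((f:Int) + 1 - 1) = (f:Int) by ring]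
      have hsf : finish ≤ start := by omega
      have key : ∀ (m : Nat) (s : Int), finish ≤ s → (s - finish).toNat = m →
          (PySem.List.pyRange s finish (-1)).flatMap
              (fun x => (mtA f ((f : Int)) x finish).map (fun t => x :: t)) =
            cwr (f + 1) (PySem.List.pyRange s finish (-1)) := by
        intro m
        induction m with
        | zero =>
          intro s hs hm
          have : s ≤ finish := by omega
          rw [PySem.List.pyRange_neg_one_eq_nil this]
          simp [cwr]
        | succ m ihm =>
          intro s hs hm
          have hlt : finish < s := by omega
          rw [PySem.List.pyRange_neg_one_cons hlt]
          rw [List.flatMap_cons, cwr]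
          have htail := ihm (s - 1) (by omega) (by omega)
          rw [htail]
          congr 1
          rw [ih s]
          have hnot : ¬ (finish > s) := by omega
          simp only [hnot, if_false]
          rw [← PySem.List.pyRange_neg_one_cons hlt]
      exact key (start - finish).toNat start hsf rfl

theorem alt_eq_cwr (depth start finish : Int) (hd : 0 ≤ depth) :
    make_tuples_alt depth start finish =
      cwr depth.toNat (PySem.List.pyRange start finish (if finish > start then 1 else -1)) := by
  have hneg : ¬ depth < 0 := by omega
  rw [make_tuples_alt]
  simp only [hneg, if_false]
  rw [foldl_range_iterate, iterate_singleton _ _ _ _ le_rfl]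
  simp

-- ===== VERDICT (by name: the statement is the Claim_ definition above) =====
theorem make_tuples_spec : Claim_equal_make_tuples := by
  intro depth start finish _ hpre
  unfold Spec_make_tuples
  by_cases h : 0 ≤ depth
  · rw [alt_eq_cwr depth start finish h]
    rw [make_tuples]
    have : ((depth.toNat : Nat) : Int) = depth := Int.toNat_of_nonneg h
    rw [← this]
    exact mtA_eq_cwr depth.toNat start finish
  · have hlt : depth < 0 := by omega
    rcases hpre with h0 | heq
    · omega
    · subst heq
      have hne : depth ≠ 0 := by omega
      have h0 : depth.toNat = 0 := by omega
      rw [make_tuples, h0, mtA]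
      simp only [hne, if_false]
      rw [make_tuples_alt]
      simp [hlt]
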